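-- pv_equiv track=rewrite | github.com/bmtlima/On-Policy-Distillation | answer_extraction.py | _fix_sqrt
-- ===== SOURCE A (Python) =====
-- def _fix_sqrt(string: str) -> str:
--     """Fix \\sqrt without braces: \\sqrt3 -> \\sqrt{3}."""
--     if "\\sqrt" not in string:
--         return string
--     splits = string.split("\\sqrt")
--     new_string = splits[0]
--     for split in splits[1:]:
--         if len(split) == 0 or split[0] == "{":
--             new_string += "\\sqrt" + split
--         else:
--             new_string += "\\sqrt{" + split[0] + "}" + split[1:]
--     return new_string
-- ===== SOURCE B (Python) =====
-- def _fix_sqrt(string: str) -> str: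
--     """Fix \\sqrt without braces: \\sqrt3 -> \\sqrt{3} (single left-to-right scan)."""
--     out = []
--     i = 0
--     n = len(string)
--     while i < n:
--         if string.startswith("\\sqrt", i):
--             out.append("\\sqrt")
--             i += 5
--             if i < n and string[i] != "{" and not string.startswith("\\sqrt", i):
--                 out.append("{" + string[i] + "}")
--                 i += 1
--         else:
--             out.append(string[i])
--             i += 1
--     return "".join(out)
-- ===== Notes on version B (the rewrite author's own statement) =====
-- stated objective: alternative
-- what changed: A splits the string on "\sqrt" and rebuilds it piece by piece; B does a single left-to-right scan that copies characters and braces the character following each unbraced "\sqrt" in place, with no split/rebuild.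
import Mathlib
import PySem

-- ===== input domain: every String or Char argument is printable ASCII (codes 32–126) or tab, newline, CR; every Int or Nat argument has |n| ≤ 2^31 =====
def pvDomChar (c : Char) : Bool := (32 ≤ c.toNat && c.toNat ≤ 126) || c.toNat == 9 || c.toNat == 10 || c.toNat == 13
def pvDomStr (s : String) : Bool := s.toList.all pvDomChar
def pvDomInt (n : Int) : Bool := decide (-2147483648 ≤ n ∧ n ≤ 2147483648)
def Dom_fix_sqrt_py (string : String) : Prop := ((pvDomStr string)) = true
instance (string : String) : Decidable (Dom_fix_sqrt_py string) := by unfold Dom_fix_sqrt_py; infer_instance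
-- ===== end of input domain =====

-- B replaces A's split-and-rebuild with a single left-to-right scan that wraps the character
-- after an unbraced "\sqrt" as it goes (objective: alternative, one pass, no split allocation).

-- ===== PORT A =====
-- literal port of A: early return when "\sqrt" is absent, then split on "\sqrt" and rebuild
def fix_sqrt_py (string : String) : String :=
  if PySem.Str.isIn "\\sqrt" string = false then string
  else
    let splits := PySem.Chars.splitOn string.toList "\\sqrt".toList
    String.ofList
      ((PySem.List.slice splits (some 1) none).foldl
        (fun new_string split =>
          if split.length = 0 ∨ PySem.List.pyGet? split 0 = some '{' then
            new_string ++ "\\sqrt".toList ++ split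
          else
            new_string ++ "\\sqrt{".toList ++ [PySem.List.pyGetD split 0 ' '] ++ "}".toList
              ++ PySem.List.slice split (some 1) none)
        (PySem.List.pyGetD splits 0 []))

-- ===== PORT B =====
def sqrtL : List Char := ['\\', 's', 'q', 'r', 't']

-- B's scan: on "\sqrt" consume it; brace the next char unless it is '{', missing, or starts another "\sqrt"
def fixSqrtScan : List Char → List Char
  | [] => []
  | c :: rest =>
    if sqrtL.isPrefixOf (c :: rest) then
      match hm : rest.drop 4 with      -- the characters after this "\sqrt" (i += 5)
      | [] => sqrtL
      | d :: rs =>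
        if d = '{' ∨ sqrtL.isPrefixOf (d :: rs) then sqrtL ++ fixSqrtScan (d :: rs)
        else sqrtL ++ '{' :: d :: '}' :: fixSqrtScan rs
    else c :: fixSqrtScan rest
termination_by l => l.length
decreasing_by
  · have h := congrArg List.length hm; simp at h ⊢; omega
  · have h := congrArg List.length hm; simp at h ⊢; omega
  · simp

def fix_sqrt_py_alt (string : String) : String :=
  String.ofList (fixSqrtScan string.toList)

-- ===== PRECONDITION & SPEC =====
def Spec_fix_sqrt_py (string : String) (out : String) : Prop := out = fix_sqrt_py_alt string
instance (string : String) (out : String) : Decidable (Spec_fix_sqrt_py string out) := by unfold Spec_fix_sqrt_py; infer_instance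

-- ===== CLAIM (what is proved, stated in full; the proofs are below) =====
def Claim_equal_fix_sqrt_py : Prop := ∀ (string : String), Dom_fix_sqrt_py string → Spec_fix_sqrt_py string (fix_sqrt_py string)

-- ===== LEMMAS AND PROOFS =====

-- accumulator-free model of splitOn on the separator sqrtL: (first piece, remaining pieces)
def sp2 : List Char → List Char × List (List Char)
  | [] => ([], [])
  | c :: rest =>
    if sqrtL.isPrefixOf (c :: rest) then
      ([], (sp2 (rest.drop 4)).1 :: (sp2 (rest.drop 4)).2)
    else
      (c :: (sp2 rest).1, (sp2 rest).2)
termination_by l => l.length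
decreasing_by
  all_goals simp

lemma go_spec : ∀ (fuel : Nat) (l cur : List Char) (acc : List (List Char)), l.length ≤ fuel →
    PySem.Chars.splitOn.go sqrtL fuel l cur acc
      = acc.reverse ++ (cur.reverse ++ (sp2 l).1) :: (sp2 l).2 := by
  intro fuel
  induction fuel with
  | zero =>
    intro l cur acc h
    have hl : l = [] := by cases l <;> simp_all
    subst hl
    rw [PySem.Chars.splitOn.go]
    simp [sp2]

  | succ n ih =>
    intro l cur acc h
    cases l with
    | nil =>
      rw [PySem.Chars.splitOn.go]
      simp [sp2]
      omega
    | cons c rest =>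
      rw [PySem.Chars.splitOn.go]
      by_cases hp : sqrtL.isPrefixOf (c :: rest)
      · have hdrop : List.drop sqrtL.length (c :: rest) = rest.drop 4 := rfl
        simp only [hp, if_true, hdrop]
        rw [ih (rest.drop 4) [] (cur.reverse :: acc)
              (by simp at h ⊢; omega)]
        rw [sp2]
        simp [hp]
      · simp only [hp, if_false, Bool.false_eq_true]
        rw [ih rest (c :: cur) acc (by simp at h ⊢; omega)]
        rw [sp2]
        simp [hp]

lemma splitOn_eq (cs : List Char) :
    PySem.Chars.splitOn cs "\\sqrt".toList = (sp2 cs).1 :: (sp2 cs).2 := by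
  have hsq : "\\sqrt".toList = sqrtL := by decide
  rw [hsq]
  unfold PySem.Chars.splitOn
  rw [go_spec _ _ _ _ (by omega)]
  simp

-- A's loop body as a function of the piece
def stepA (split : List Char) : List Char :=
  if split.length = 0 ∨ PySem.List.pyGet? split 0 = some '{' then "\\sqrt".toList ++ split
  else "\\sqrt{".toList ++ [PySem.List.pyGetD split 0 ' '] ++ "}".toList
         ++ PySem.List.slice split (some 1) none

lemma stepA_nil : stepA [] = sqrtL := by decide

lemma stepA_brace (t : List Char) : stepA ('{' :: t) = sqrtL ++ '{' :: t := by
  simp [stepA, sqrtL]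

lemma stepA_other (c : Char) (t : List Char) (hc : c ≠ '{') :
    stepA (c :: t) = sqrtL ++ '{' :: c :: '}' :: t := by
  simp [stepA, PySem.List.pyGetD_zero_cons, PySem.List.slice_from_one, hc, sqrtL]

lemma fold_eq (l : List (List Char)) (init : List Char) :
    l.foldl
      (fun new_string split =>
        if split.length = 0 ∨ PySem.List.pyGet? split 0 = some '{' then
          new_string ++ "\\sqrt".toList ++ split
        else
          new_string ++ "\\sqrt{".toList ++ [PySem.List.pyGetD split 0 ' '] ++ "}".toList ++ split.tail)
      init = init ++ l.flatMap stepA := by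
  induction l generalizing init with
  | nil => simp
  | cons x xs ih =>
    simp only [List.foldl_cons, List.flatMap_cons, ih]
    unfold stepA
    split_ifs <;> simp [PySem.List.slice_from_one]

-- what B's scan emits after a consumed "\sqrt" (without the "\sqrt" itself)
def kk : List Char → List Char
  | [] => []
  | d :: rs =>
    if d = '{' ∨ sqrtL.isPrefixOf (d :: rs) then fixSqrtScan (d :: rs)
    else '{' :: d :: '}' :: fixSqrtScan rs

lemma scan_prefix (c : Char) (rest : List Char) (hp : sqrtL.isPrefixOf (c :: rest)) :
    fixSqrtScan (c :: rest) = sqrtL ++ kk (rest.drop 4) := by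
  rw [fixSqrtScan]
  simp only [hp, if_true]
  rcases h4 : rest.drop 4 with _ | ⟨d, rs⟩
  · simp [kk]
  · rw [kk]
    simp only [List.isPrefixOf_iff_prefix]
    split_ifs <;> simp

lemma scan_not_prefix (c : Char) (rest : List Char) (hp : ¬ sqrtL.isPrefixOf (c :: rest)) :
    fixSqrtScan (c :: rest) = c :: fixSqrtScan rest := by
  rw [fixSqrtScan]
  simp [hp]

lemma main_lemma : ∀ (n : Nat) (cs : List Char), cs.length ≤ n →
    (sp2 cs).1 ++ ((sp2 cs).2.flatMap stepA) = fixSqrtScan cs ∧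
    stepA (sp2 cs).1 ++ ((sp2 cs).2.flatMap stepA) = sqrtL ++ kk cs := by
  intro n
  induction n with
  | zero =>
    intro cs h
    have : cs = [] := by cases cs <;> simp_all
    subst this
    refine ⟨by simp [sp2, fixSqrtScan], ?_⟩
    simp [sp2, stepA_nil, kk]
  | succ n ih =>
    intro cs h
    cases cs with
    | nil =>
      refine ⟨by simp [sp2, fixSqrtScan], ?_⟩
      simp [sp2, stepA_nil, kk]
    | cons c rest =>
      by_cases hp : sqrtL.isPrefixOf (c :: rest)
      · have hlen : (rest.drop 4).length ≤ n := by simp at h ⊢; omega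
        obtain ⟨ih1, ih2⟩ := ih (rest.drop 4) hlen
        rw [sp2]
        simp only [hp, if_true, List.flatMap_cons, List.nil_append]
        have h1 : stepA (sp2 (rest.drop 4)).1 ++ ((sp2 (rest.drop 4)).2.flatMap stepA)
            = sqrtL ++ kk (rest.drop 4) := ih2
        have hkk : kk (c :: rest) = fixSqrtScan (c :: rest) := by
          rw [kk]; simp [hp]
        constructor
        · rw [h1, scan_prefix c rest hp]
        · rw [stepA_nil, hkk, scan_prefix c rest hp]
          simp [← h1]
      · have hlen : rest.length ≤ n := by simp at h; omega
        obtain ⟨ih1, ih2⟩ := ih rest hlen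
        rw [sp2]
        simp only [hp, Bool.false_eq_true, if_false]
        constructor
        · rw [List.cons_append, ih1, scan_not_prefix c rest hp]
        · by_cases hc : c = '{'
          · subst hc
            rw [stepA_brace]
            have hkk : kk ('{' :: rest) = fixSqrtScan ('{' :: rest) := by
              rw [kk]; simp
            rw [hkk, scan_not_prefix _ rest hp]
            simp [ih1]
          · rw [stepA_other c _ hc]
            have hkk : kk (c :: rest) = '{' :: c :: '}' :: fixSqrtScan rest := by
              rw [kk]; simp [hc, hp]
            rw [hkk]
            simp [ih1]

lemma scan_no_sqrt : ∀ (cs : List Char), ¬ sqrtL <:+: cs → fixSqrtScan cs = cs := by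
  intro cs
  induction cs with
  | nil => intro _; rw [fixSqrtScan]
  | cons c rest ih =>
    intro h
    have hp : ¬ sqrtL.isPrefixOf (c :: rest) := by
      intro hpre
      exact h (List.isPrefixOf_iff_prefix.mp hpre).isInfix
    rw [scan_not_prefix c rest hp, ih]
    intro ht
    exact h (ht.trans (List.suffix_cons c rest).isInfix)

-- ===== VERDICT (by name: the statement is the Claim_ definition above) =====
theorem fix_sqrt_py_spec : Claim_equal_fix_sqrt_py := by
  intro s _hdom
  unfold Spec_fix_sqrt_py fix_sqrt_py fix_sqrt_py_alt
  by_cases hin : PySem.Str.isIn "\\sqrt" s = false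
  · rw [if_pos hin]
    have hchars : PySem.Chars.isIn "\\sqrt".toList s.toList = false := by simpa using hin
    have hni : ¬ sqrtL <:+: s.toList := by
      have h := (PySem.Chars.isIn_eq_false_iff _ _).mp hchars
      have hsq : "\\sqrt".toList = sqrtL := by decide
      rwa [hsq] at h
    rw [scan_no_sqrt _ hni, String.ofList_toList]
  · rw [if_neg hin]
    simp only [splitOn_eq, PySem.List.slice_from_one, PySem.List.pyGetD_zero_cons,
      List.tail_cons]
    rw [fold_eq]
    obtain ⟨h1, _⟩ := main_lemma s.toList.length s.toList (le_refl _)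
    rw [h1]
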